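-- pv_equiv track=rewrite | github.com/GabrielTorland/advent_of_code | 2023/day02/main.py | part_2
-- ===== SOURCE A (Python) =====
-- def part_2(games):
--     """Find the minimum limit for each game and then calculate the power."""
--     power_games = []
--     for game in games:
--         min_red = max(game, key=lambda x: x[0])[0]
--         min_green = max(game, key=lambda x: x[1])[1]
--         min_blue = max(game, key=lambda x: x[2])[2]
--         power_games.append(min_red*min_green*min_blue)
--     return power_games
-- ===== SOURCE B (Python) =====
-- def part_2(games):
--     """Find the minimum limit for each game and then calculate the power."""
--     powers = []
--     for game in games:
--         r, g, b = game[0]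
--         for x, y, z in game[1:]:
--             r = max(r, x)
--             g = max(g, y)
--             b = max(b, z)
--         powers.append(r * g * b)
--     return powers
-- ===== Notes on version B (the rewrite author's own statement) =====
-- stated objective: simpler
-- what changed: Replaces three separate key-based max() reductions over each game by a single pass keeping three running maxima seeded from the first entry.
import Mathlib
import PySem

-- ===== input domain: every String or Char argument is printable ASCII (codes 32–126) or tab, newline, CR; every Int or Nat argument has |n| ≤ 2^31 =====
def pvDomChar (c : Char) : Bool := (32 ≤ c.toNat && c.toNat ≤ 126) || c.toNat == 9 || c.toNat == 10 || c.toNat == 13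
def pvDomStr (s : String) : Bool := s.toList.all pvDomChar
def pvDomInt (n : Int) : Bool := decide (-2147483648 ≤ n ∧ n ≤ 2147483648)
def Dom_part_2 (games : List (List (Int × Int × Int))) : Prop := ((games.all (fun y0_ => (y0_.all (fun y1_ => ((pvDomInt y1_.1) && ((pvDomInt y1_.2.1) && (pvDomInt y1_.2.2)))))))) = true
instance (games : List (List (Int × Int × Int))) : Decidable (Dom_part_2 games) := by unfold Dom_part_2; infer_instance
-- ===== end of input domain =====

-- B folds each game once with three running maxima (seeded from the first entry)
-- instead of A's three separate key-based max reductions; objective: simpler.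
-- Pre_ excludes games containing an empty game, on which both A and B raise.


-- ===== PORT A =====
-- max(game, key=...) raises ValueError on an empty game; Pre_ excludes that, the
-- .getD default below is never reached inside Pre_.
def part_2 (games : List (List (Int × Int × Int))) : List Int :=
  games.foldl (fun power_games game =>
    let min_red := ((PySem.List.max? game (fun x => x.1)).getD (0, 0, 0)).1
    let min_green := ((PySem.List.max? game (fun x => x.2.1)).getD (0, 0, 0)).2.1
    let min_blue := ((PySem.List.max? game (fun x => x.2.2)).getD (0, 0, 0)).2.2
    power_games ++ [min_red * min_green * min_blue]) []

-- ===== PORT B =====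
-- game[0] raises IndexError on an empty game (outside Pre_); here that branch adds nothing.
def part_2_alt (games : List (List (Int × Int × Int))) : List Int :=
  games.foldl (fun powers game =>
    match game with
    | [] => powers
    | first :: rest =>
      let m := rest.foldl
        (fun (m : Int × Int × Int) x => (max m.1 x.1, max m.2.1 x.2.1, max m.2.2 x.2.2)) first
      powers ++ [m.1 * m.2.1 * m.2.2]) []

-- ===== PRECONDITION & SPEC =====
-- Pre_ excludes inputs containing an empty game: there A raises ValueError (max of
-- an empty sequence) and B raises IndexError (game[0]).
def Pre_part_2 (games : List (List (Int × Int × Int))) : Prop :=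
  ∀ game ∈ games, game ≠ []
instance (games : List (List (Int × Int × Int))) : Decidable (Pre_part_2 games) := by
  unfold Pre_part_2; infer_instance
def pvWitness_part_2 : (List (List (Int × Int × Int))) := [[(1, 2, 3), (4, 0, 2)], [(5, 5, 5)]]
def Spec_part_2 (games : List (List (Int × Int × Int))) (out : List Int) : Prop := out = part_2_alt games
instance (games : List (List (Int × Int × Int))) (out : List Int) : Decidable (Spec_part_2 games out) := by unfold Spec_part_2; infer_instance

-- ===== CLAIM (what is proved, stated in full; the proofs are below) =====
def Claim_equal_part_2 : Prop := ∀ (games : List (List (Int × Int × Int))), Dom_part_2 games → Pre_part_2 games → Spec_part_2 games (part_2 games)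

-- ===== LEMMAS AND PROOFS =====

-- the projection under the key of the first key-maximal element equals the running max
-- of that projection, seeded from the head
theorem proj_max_eq {β : Type} (f : β → Int) (h : β) (t : List β) (m : β)
    (hm : PySem.List.max? (h :: t) f = some m) :
    f m = t.foldl (fun acc y => max acc (f y)) (f h) := by
  have hle := PySem.List.le_foldl_max_int t f (f h)
  have hmax := PySem.List.max?_isMax hm
  have hmem := PySem.List.max?_mem hm
  have hfold : t.foldl (fun acc y => max acc (f y)) (f h) = (t.map f).foldl max (f h) := by
    rw [List.foldl_map]
  rw [hfold] at hle ⊢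
  have hub : f m ≤ (t.map f).foldl max (f h) := by
    rcases List.mem_cons.mp hmem with hm1 | hm1
    · exact hm1 ▸ hle.1
    · exact hle.2 m hm1
  have hlb : (t.map f).foldl max (f h) ≤ f m := by
    rcases PySem.List.foldl_max_mem (t.map f) (f h) with hc | hc
    · rw [hc]; exact hmax h (by simp)
    · rcases List.mem_map.mp hc with ⟨x, hx, hfx⟩
      rw [← hfx]; exact hmax x (by simp [hx])
  omega

-- the triple fold of B computes the three projected running maxima componentwise
theorem triple_fold (t : List (Int × Int × Int)) (m : Int × Int × Int) :
    t.foldl (fun (m : Int × Int × Int) x => (max m.1 x.1, max m.2.1 x.2.1, max m.2.2 x.2.2)) m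
      = (t.foldl (fun acc y => max acc y.1) m.1,
         t.foldl (fun acc y => max acc y.2.1) m.2.1,
         t.foldl (fun acc y => max acc y.2.2) m.2.2) := by
  induction t generalizing m with
  | nil => rfl
  | cons x xs ih => simp [List.foldl_cons, ih]

-- ===== VERDICT (by name: the statement is the Claim_ definition above) =====
theorem part_2_spec : Claim_equal_part_2 := by
  intro games _ hpre
  unfold Spec_part_2 part_2 part_2_alt
  apply PySem.List.foldl_congr_mem
  intro acc game hgame
  match game, hpre game hgame with
  | first :: rest, _ =>
    simp only [triple_fold]
    cases h1 : PySem.List.max? (first :: rest) (fun x => x.1) with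
    | none => exact absurd ((PySem.List.max?_eq_none_iff _ _).mp h1) (List.cons_ne_nil _ _)
    | some m1 =>
    cases h2 : PySem.List.max? (first :: rest) (fun x => x.2.1) with
    | none => exact absurd ((PySem.List.max?_eq_none_iff _ _).mp h2) (List.cons_ne_nil _ _)
    | some m2 =>
    cases h3 : PySem.List.max? (first :: rest) (fun x => x.2.2) with
    | none => exact absurd ((PySem.List.max?_eq_none_iff _ _).mp h3) (List.cons_ne_nil _ _)
    | some m3 =>
      simp only [Option.getD_some]
      rw [proj_max_eq _ _ _ _ h1, proj_max_eq _ _ _ _ h2, proj_max_eq _ _ _ _ h3]
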